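-- pv_equiv track=rewrite | github.com/teimurjan/codility-solutions | lesson_5/genomic_range_query.py | get_prefix_sums
-- ===== SOURCE A (Python) =====
-- def get_prefix_sums(s):
--     impact_of = {'A': 1, 'C': 2, 'G': 3, 'T': 4}
--     sums = []
--     prev = [0, 0, 0, 0]
--     for i, s_i in enumerate(s):
--         impact = impact_of[s_i]
--         prev = [prev[0] + 1 if impact == 1 else prev[0],
--                 prev[1] + 1 if impact == 2 else prev[1],
--                 prev[2] + 1 if impact == 3 else prev[2],
--                 prev[3] + 1 if impact == 4 else prev[3], ]
--         sums.append(prev)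
--     return sums
-- ===== SOURCE B (Python) =====
-- def get_prefix_sums(s):
--     impact_of = {'A': 1, 'C': 2, 'G': 3, 'T': 4}
--     impacts = [impact_of[c] for c in s]
--     cols = []
--     for k in (1, 2, 3, 4):
--         total = 0
--         col = []
--         for im in impacts:
--             total += (im == k)
--             col.append(total)
--         cols.append(col)
--     return [list(t) for t in zip(*cols)]
-- ===== Notes on version B (the rewrite author's own statement) =====
-- stated objective: alternative
-- what changed: Replaces A's single row-wise fold that rebuilds a 4-entry row per character with a column-wise decomposition: map the string to impact codes once, build four independent per-nucleotide prefix-sum columns, then transpose them into rows.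
import Mathlib
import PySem

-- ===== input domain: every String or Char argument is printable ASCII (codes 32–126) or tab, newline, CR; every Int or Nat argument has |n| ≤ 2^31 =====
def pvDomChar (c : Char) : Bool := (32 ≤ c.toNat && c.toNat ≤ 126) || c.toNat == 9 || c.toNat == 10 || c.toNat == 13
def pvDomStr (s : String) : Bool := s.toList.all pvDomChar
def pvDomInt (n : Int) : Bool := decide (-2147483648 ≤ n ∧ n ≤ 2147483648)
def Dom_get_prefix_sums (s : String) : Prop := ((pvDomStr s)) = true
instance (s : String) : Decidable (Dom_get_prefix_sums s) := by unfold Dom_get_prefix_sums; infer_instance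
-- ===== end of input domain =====

-- B replaces A's row-wise fold by four per-nucleotide prefix-sum columns that are then
-- transposed into rows (objective: alternative decomposition, same O(n) cost).

-- ===== PORT A =====
-- the literal dict {'A': 1, 'C': 2, 'G': 3, 'T': 4}
def pvImpactOf : PySem.Dict Char Int :=
  PySem.Dict.ofList [('A', 1), ('C', 2), ('G', 3), ('T', 4)]

def get_prefix_sums (s : String) : List (List Int) :=
  -- sums = []; prev = [0,0,0,0]; for s_i in s: … ; return sums
  (s.toList.foldl
    (fun (st : List (List Int) × List Int) s_i =>
      let impact := (pvImpactOf.get? s_i).getD 0   -- KeyError case excluded by Pre_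
      let prev := st.2
      let prev' := [(prev.getD 0 0) + (if impact = 1 then 1 else 0),
                    (prev.getD 1 0) + (if impact = 2 then 1 else 0),
                    (prev.getD 2 0) + (if impact = 3 then 1 else 0),
                    (prev.getD 3 0) + (if impact = 4 then 1 else 0)]
      (st.1 ++ [prev'], prev'))
    ([], [0, 0, 0, 0])).1

-- ===== PORT B =====
-- inner loop: total = 0; col = []; for im in impacts: total += (im == k); col.append(total)
def pvAccumCol (k : Int) (impacts : List Int) : List Int :=
  (impacts.foldl
    (fun (st : Int × List Int) im =>
      let t := st.1 + (if im = k then 1 else 0)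
      (t, st.2 ++ [t]))
    (0, [])).2

-- zip(*cols) for the four columns, wrapping each tuple as a list
def pvZip4 : List Int → List Int → List Int → List Int → List (List Int)
  | a :: as_, b :: bs, c :: cs, d :: ds => [a, b, c, d] :: pvZip4 as_ bs cs ds
  | _, _, _, _ => []

def get_prefix_sums_alt (s : String) : List (List Int) :=
  let impacts := s.toList.map (fun c => (pvImpactOf.get? c).getD 0)
  pvZip4 (pvAccumCol 1 impacts) (pvAccumCol 2 impacts)
         (pvAccumCol 3 impacts) (pvAccumCol 4 impacts)

-- ===== PRECONDITION & SPEC =====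
-- Pre_ excludes exactly the strings containing a character that is not one of the four
-- nucleotide letters, on which Python A (and B) raises KeyError at the dict lookup.
def Pre_get_prefix_sums (s : String) : Prop :=
  (s.toList.all (fun c => c == 'A' || c == 'C' || c == 'G' || c == 'T')) = true
instance (s : String) : Decidable (Pre_get_prefix_sums s) := by
  unfold Pre_get_prefix_sums; infer_instance

def pvWitness_get_prefix_sums : String := "GACCT"

def Spec_get_prefix_sums (s : String) (out : List (List Int)) : Prop := out = get_prefix_sums_alt s
instance (s : String) (out : List (List Int)) : Decidable (Spec_get_prefix_sums s out) := by unfold Spec_get_prefix_sums; infer_instance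

-- ===== CLAIM (what is proved, stated in full; the proofs are below) =====
def Claim_equal_get_prefix_sums : Prop := ∀ (s : String), Dom_get_prefix_sums s → Pre_get_prefix_sums s → Spec_get_prefix_sums s (get_prefix_sums s)

-- ===== LEMMAS AND PROOFS =====

-- reference column: prefix sums of the k-indicator starting from t
def pvColFrom (k t : Int) : List Int → List Int
  | [] => []
  | im :: r => (t + (if im = k then 1 else 0)) :: pvColFrom k (t + (if im = k then 1 else 0)) r

theorem pvAccumCol_aux (k : Int) (impacts : List Int) :
    ∀ (t : Int) (acc : List Int),
      (impacts.foldl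
        (fun (st : Int × List Int) im =>
          let t := st.1 + (if im = k then 1 else 0)
          (t, st.2 ++ [t]))
        (t, acc)).2 = acc ++ pvColFrom k t impacts := by
  induction impacts with
  | nil => intro t acc; simp [pvColFrom]
  | cons im r ih =>
      intro t acc
      simp only [List.foldl_cons, pvColFrom, ih, List.append_assoc, List.singleton_append]

theorem pvAccumCol_eq (k : Int) (impacts : List Int) :
    pvAccumCol k impacts = pvColFrom k 0 impacts := by
  simpa using pvAccumCol_aux k impacts 0 []

theorem pvZip4_colFrom (impacts : List Int) :
    ∀ (p1 p2 p3 p4 : Int) (acc : List (List Int)),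
      (impacts.foldl
        (fun (st : List (List Int) × List Int) im =>
          let prev := st.2
          let prev' := [(prev.getD 0 0) + (if im = 1 then 1 else 0),
                        (prev.getD 1 0) + (if im = 2 then 1 else 0),
                        (prev.getD 2 0) + (if im = 3 then 1 else 0),
                        (prev.getD 3 0) + (if im = 4 then 1 else 0)]
          (st.1 ++ [prev'], prev'))
        (acc, [p1, p2, p3, p4])).1
      = acc ++ pvZip4 (pvColFrom 1 p1 impacts) (pvColFrom 2 p2 impacts)
                      (pvColFrom 3 p3 impacts) (pvColFrom 4 p4 impacts) := by
  induction impacts with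
  | nil => intro p1 p2 p3 p4 acc; simp [pvColFrom, pvZip4]
  | cons im r ih =>
      intro p1 p2 p3 p4 acc
      rw [List.foldl_cons]
      show (r.foldl _
          (acc ++ [[p1 + (if im = 1 then 1 else 0), p2 + (if im = 2 then 1 else 0),
                    p3 + (if im = 3 then 1 else 0), p4 + (if im = 4 then 1 else 0)]],
           [p1 + (if im = 1 then 1 else 0), p2 + (if im = 2 then 1 else 0),
            p3 + (if im = 3 then 1 else 0), p4 + (if im = 4 then 1 else 0)])).1 = _
      rw [ih]
      simp [pvColFrom, pvZip4, List.append_assoc]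

theorem get_prefix_sums_eq (s : String) :
    get_prefix_sums s = get_prefix_sums_alt s := by
  have h := pvZip4_colFrom (s.toList.map (fun c => (pvImpactOf.get? c).getD 0)) 0 0 0 0 []
  rw [List.foldl_map] at h
  exact h.trans (by simp [get_prefix_sums_alt, pvAccumCol_eq])

-- ===== VERDICT (by name: the statement is the Claim_ definition above) =====
theorem get_prefix_sums_spec : Claim_equal_get_prefix_sums := by
  intro s _ _
  unfold Spec_get_prefix_sums
  exact get_prefix_sums_eq s
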